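-- pv_equiv track=rewrite | github.com/nvshah/problem-solving-cp | leetcode/backtrack/medium/find_unique_binary_str.py | findDifferentBinaryString2
-- ===== SOURCE A (Python) =====
-- from typing import List
--
-- def findDifferentBinaryString2(nums: List[str]) -> str:
--     l = len(nums)
--     numSet = {*nums}
--     def backtrack(d, string):
--         if d == l: # max depth
--             if string not in numSet:
--                 return string
--             else:
--                 return None
--
--         # # 0
--         # r = backtrack(d+1, string+'0')
--         # if r:
--         #     return r
--
--         # # 1
--         # r = backtrack(d+1, string+'1')
--         # if r:
--         #     return r
--
--         # Explore each one by one
--         for b in ('0', '1'):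
--             r = backtrack(d+1, string+b)
--             if r: return r
--
--         #return ''
--
--     return backtrack(0, '')
-- ===== SOURCE B (Python) =====
-- from typing import List
--
-- def findDifferentBinaryString2(nums: List[str]) -> str:
--     # Lex-smallest missing n-bit string: among the n+1 smallest n-bit values 0..n,
--     # at most n can be blocked, so the first numerically-missing one is the answer
--     # (numeric order of fixed-width binary strings is lex order).
--     n = len(nums)
--     seen = set(nums)
--     for i in range(n + 1):
--         cand = ''.join('1' if (i >> k) & 1 else '0' for k in range(n - 1, -1, -1))
--         if cand not in seen:
--             return cand
-- ===== Notes on version B (the rewrite author's own statement) =====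
-- stated objective: faster
-- what changed: Replaced A's recursive lexicographic backtracking over the tree of all length-n binary strings by a flat scan of the n+1 smallest n-bit values 0..n (numeric order equals lex order at fixed width; pigeonhole guarantees one is absent), built directly from the bits of the counter.
import Mathlib
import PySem

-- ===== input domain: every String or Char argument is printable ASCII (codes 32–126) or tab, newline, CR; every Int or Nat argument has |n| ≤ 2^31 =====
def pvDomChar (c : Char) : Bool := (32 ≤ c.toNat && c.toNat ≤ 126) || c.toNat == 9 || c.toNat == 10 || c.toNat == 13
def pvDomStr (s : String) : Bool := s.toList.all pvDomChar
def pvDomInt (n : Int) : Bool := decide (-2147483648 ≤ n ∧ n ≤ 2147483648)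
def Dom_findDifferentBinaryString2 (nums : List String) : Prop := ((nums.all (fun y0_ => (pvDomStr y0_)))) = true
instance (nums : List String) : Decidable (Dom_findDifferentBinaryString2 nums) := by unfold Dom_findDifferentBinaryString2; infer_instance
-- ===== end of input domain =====

-- B replaces A's recursive lex-order backtracking over all length-n binary strings by a direct
-- scan of the n+1 smallest n-bit values 0..n (numeric order = lex order for fixed width;
-- pigeonhole guarantees one of them is missing). Return values proved equal on all inputs.


-- ===== PORT A =====
-- Python truthiness of the Optional[str] result r in `if r: return r` (None and "" are falsy)
def pvTruthy : Option String → Bool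
  | none => false
  | some s => !(s == "")

-- `backtrack(d, string)` with fuel = l - d (the remaining depth)
def pvBacktrack (numSet : PySem.Set String) : Nat → String → Option String
  | 0, s => if !(PySem.Set.contains numSet s) then some s else none
  | k+1, s =>
    let r0 := pvBacktrack numSet k (s ++ "0")
    if pvTruthy r0 then r0 else
    let r1 := pvBacktrack numSet k (s ++ "1")
    if pvTruthy r1 then r1 else none

def findDifferentBinaryString2 (nums : List String) : Option String :=
  pvBacktrack (PySem.Set.ofList nums) nums.length ""

-- ===== PORT B =====
-- '1' if (i >> k) & 1 else '0'
def pvBitChar (i k : Nat) : Char := if ((i >>> k) &&& 1) ≠ 0 then '1' else '0'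

-- ''.join(... for k in range(n-1, -1, -1))  — range(n-1,-1,-1) is (List.range n).reverse
def pvToBin (n i : Nat) : String :=
  String.ofList (((List.range n).reverse).map (pvBitChar i))

-- the `for i in range(n+1)` loop; falls off the end → none (the implicit `return None`)
def pvScan (seen : PySem.Set String) (n : Nat) : List Nat → Option String
  | [] => none
  | i :: rest =>
    let cand := pvToBin n i
    if !(PySem.Set.contains seen cand) then some cand else pvScan seen n rest

def findDifferentBinaryString2_alt (nums : List String) : Option String :=
  let n := nums.length
  let seen := PySem.Set.ofList nums
  pvScan seen n (List.range (n+1))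

-- ===== PRECONDITION & SPEC =====
def Spec_findDifferentBinaryString2 (nums : List String) (out : Option String) : Prop := out = findDifferentBinaryString2_alt nums
instance (nums : List String) (out : Option String) : Decidable (Spec_findDifferentBinaryString2 nums out) := by unfold Spec_findDifferentBinaryString2; infer_instance

-- ===== CLAIM (what is proved, stated in full; the proofs are below) =====
def Claim_equal_findDifferentBinaryString2 : Prop := ∀ (nums : List String), Dom_findDifferentBinaryString2 nums → Spec_findDifferentBinaryString2 nums (findDifferentBinaryString2 nums)

-- ===== LEMMAS AND PROOFS =====

-- the candidate strings explored by A's backtracking from prefix s with k levels left, in visit order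
def pvCnds (s : String) : Nat → List String
  | 0 => [s]
  | k+1 => pvCnds (s ++ "0") k ++ pvCnds (s ++ "1") k

theorem pvCnds_length {k : Nat} {s t : String} (h : t ∈ pvCnds s k) : t.length = s.length + k := by
  induction k generalizing s with
  | zero => simp [pvCnds] at h; simp [h]
  | succ k ih =>
    simp only [pvCnds, List.mem_append] at h
    have e0 : ("0" : String).length = 1 := rfl
    have e1 : ("1" : String).length = 1 := rfl
    rcases h with h | h <;> have := ih h <;> simp [e0, e1] at this <;> omega

-- A's backtracking is the first candidate not in the set
theorem pvBacktrack_eq_find? (numSet : PySem.Set String) (k : Nat) (s : String) :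
    pvBacktrack numSet k s = (pvCnds s k).find? (fun t => !(PySem.Set.contains numSet t)) := by
  induction k generalizing s with
  | zero =>
    simp only [pvBacktrack, pvCnds, List.find?]
    by_cases h : s ∈ numSet <;> simp [h]
  | succ k ih =>
    simp only [pvBacktrack, pvCnds, ih, List.find?_append]
    cases h0 : (pvCnds (s ++ "0") k).find? (fun t => !(PySem.Set.contains numSet t)) with
    | none =>
      simp only [Option.none_or]
      cases h1 : (pvCnds (s ++ "1") k).find? (fun t => !(PySem.Set.contains numSet t)) with
      | none => simp [pvTruthy]
      | some t =>
        have hm := List.mem_of_find?_eq_some h1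
        have hl := pvCnds_length hm
        have hne : t ≠ "" := by
          intro he; rw [he] at hl
          have e1 : ("1" : String).length = 1 := rfl
          simp [e1] at hl
          omega
        simp [pvTruthy, hne]
    | some t =>
      have hm := List.mem_of_find?_eq_some h0
      have hl := pvCnds_length hm
      have hne : t ≠ "" := by
        intro he; rw [he] at hl
        have e0 : ("0" : String).length = 1 := rfl
        simp [e0] at hl
        omega
      simp [pvTruthy, hne]

theorem pvToBin_succ_lo {k i : Nat} (h : i < 2^k) :
    ((List.range (k+1)).reverse).map (pvBitChar i) = '0' :: ((List.range k).reverse).map (pvBitChar i) := by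
  have hr : (List.range (k+1)).reverse = k :: (List.range k).reverse := by simp [List.range_succ]
  rw [hr, List.map_cons]
  have : pvBitChar i k = '0' := by
    simp [pvBitChar, Nat.shiftRight_eq_div_pow, Nat.div_eq_of_lt h]
  rw [this]

-- bits below k are unchanged by adding 2^k
theorem pvBitChar_add_pow {k j i : Nat} (hj : j < k) : pvBitChar (2^k + i) j = pvBitChar i j := by
  have hpos : 0 < 2^j := Nat.two_pow_pos j
  have hsp : 2^k = 2^(k - j) * 2^j := by rw [← pow_add]; congr 1; omega
  have hdiv : (2^k + i) / 2^j = i / 2^j + 2^(k - j) := by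
    rw [Nat.add_comm, hsp, Nat.add_mul_div_right _ _ hpos]
  obtain ⟨m, hm⟩ : ∃ m, 2^(k - j) = 2 * m :=
    ⟨2^(k - j - 1), by rw [← pow_succ']; congr 1; omega⟩
  simp only [pvBitChar, Nat.shiftRight_eq_div_pow, Nat.and_one_is_mod, hdiv, hm]
  have he : (i / 2^j + 2 * m) % 2 = i / 2^j % 2 := by omega
  rw [he]

theorem pvToBin_succ_hi {k i : Nat} (h : i < 2^k) :
    ((List.range (k+1)).reverse).map (pvBitChar (2^k + i)) = '1' :: ((List.range k).reverse).map (pvBitChar i) := by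
  have hr : (List.range (k+1)).reverse = k :: (List.range k).reverse := by simp [List.range_succ]
  rw [hr, List.map_cons]
  have hhead : pvBitChar (2^k + i) k = '1' := by
    have : (2^k + i) / 2^k = 1 := by
      rw [Nat.add_div_left i (Nat.pos_of_ne_zero (by positivity)), Nat.div_eq_of_lt h]
    simp [pvBitChar, Nat.shiftRight_eq_div_pow, this]
  rw [hhead, List.cons.injEq]
  refine ⟨rfl, ?_⟩
  apply List.map_congr_left
  intro j hj
  rw [List.mem_reverse, List.mem_range] at hj
  exact pvBitChar_add_pow hj

-- the candidate list of A is exactly B's encodings of 0 .. 2^k - 1, in order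
theorem pvCnds_eq_range (k : Nat) (s : String) :
    pvCnds s k = (List.range (2^k)).map (fun i => s ++ pvToBin k i) := by
  induction k generalizing s with
  | zero =>
    simp [pvCnds, pvToBin]
  | succ k ih =>
    have h2 : 2^(k+1) = 2^k + 2^k := by rw [pow_succ]; omega
    rw [pvCnds, ih, ih, h2, List.range_add, List.map_append, List.map_map]
    congr 1
    · apply List.map_congr_left
      intro i hi
      rw [List.mem_range] at hi
      show s ++ "0" ++ pvToBin k i = s ++ pvToBin (k+1) i
      rw [pvToBin, pvToBin, pvToBin_succ_lo hi]
      apply String.ext; simp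
    · apply List.map_congr_left
      intro i hi
      rw [List.mem_range] at hi
      show s ++ "1" ++ pvToBin k i = s ++ pvToBin (k+1) (2^k + i)
      rw [pvToBin, pvToBin, pvToBin_succ_hi hi]
      apply String.ext; simp

-- decoding: folding the bits of pvToBin recovers i mod 2^n
theorem pvToBin_val (n : Nat) : ∀ (i a : Nat),
    List.foldl (fun a c => 2*a + (if c = '1' then 1 else 0)) a (((List.range n).reverse).map (pvBitChar i))
      = a * 2^n + i % 2^n := by
  induction n with
  | zero => intro i a; simp [Nat.mod_one]
  | succ n ih =>
    intro i a
    have hr : (List.range (n+1)).reverse = n :: (List.range n).reverse := by simp [List.range_succ]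
    rw [hr, List.map_cons, List.foldl_cons, ih]
    have hb : (if pvBitChar i n = '1' then 1 else 0) = i / 2^n % 2 := by
      simp only [pvBitChar, Nat.shiftRight_eq_div_pow, Nat.and_one_is_mod]
      have : i / 2^n % 2 = 0 ∨ i / 2^n % 2 = 1 := by omega
      rcases this with h | h <;> simp [h]
    rw [hb]
    have hmm : i % (2^n * 2) = i % 2^n + 2^n * (i / 2^n % 2) := Nat.mod_mul
    have hp : (2:Nat)^(n+1) = 2^n * 2 := by rw [pow_succ]
    rw [hp, hmm]; ring

theorem pvToBin_inj {n i j : Nat} (hi : i < 2^n) (hj : j < 2^n) (h : pvToBin n i = pvToBin n j) : i = j := by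
  have hl : ((List.range n).reverse).map (pvBitChar i) = ((List.range n).reverse).map (pvBitChar j) := by
    have := congrArg String.toList h
    simpa [pvToBin] using this
  have := congrArg (List.foldl (fun a c => 2*a + (if c = '1' then 1 else 0)) 0) hl
  rw [pvToBin_val n i 0, pvToBin_val n j 0] at this
  simp only [Nat.zero_mul, Nat.zero_add] at this
  rw [Nat.mod_eq_of_lt hi, Nat.mod_eq_of_lt hj] at this
  exact this

-- B's loop is find? over the mapped range
theorem pvScan_eq_find? (seen : PySem.Set String) (n : Nat) (L : List Nat) :
    pvScan seen n L = (L.map (pvToBin n)).find? (fun t => !(PySem.Set.contains seen t)) := by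
  induction L with
  | nil => simp [pvScan]
  | cons i rest ih =>
    simp only [pvScan, List.map_cons, List.find?]
    by_cases h : pvToBin n i ∈ seen <;> simp [h, ih]

-- pigeonhole: among the n+1 candidates pvToBin n 0 .. pvToBin n n (n = |nums|), one is missing from nums
theorem pv_pigeonhole (nums : List String) :
    ((List.range (nums.length + 1)).map (pvToBin nums.length)).find?
      (fun t => !(PySem.Set.contains (PySem.Set.ofList nums) t)) ≠ none := by
  intro hnone
  set l := nums.length with hl
  have hall : ∀ t ∈ (List.range (l + 1)).map (pvToBin l), t ∈ nums := by
    intro t ht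
    have hne := List.find?_eq_none.mp hnone t ht
    by_contra hm
    have hc : PySem.Set.contains (PySem.Set.ofList nums) t = false := by simp [pysem, hm]
    exact hne (by rw [hc]; rfl)
  have hnd : ((List.range (l + 1)).map (pvToBin l)).Nodup := by
    apply List.Nodup.map_on _ (List.nodup_range)
    intro i hi j hj hij
    rw [List.mem_range] at hi hj
    have hlt : l + 1 ≤ 2^l := Nat.lt_two_pow_self
    exact pvToBin_inj (by omega) (by omega) hij
  have hsub : ((List.range (l + 1)).map (pvToBin l)).toFinset ⊆ nums.toFinset := by
    intro x hx
    rw [List.mem_toFinset] at hx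
    rw [List.mem_toFinset]
    exact hall x hx
  have h1 : ((List.range (l + 1)).map (pvToBin l)).toFinset.card = l + 1 := by
    rw [List.toFinset_card_of_nodup hnd]; simp
  have h2 : nums.toFinset.card ≤ l := by
    calc nums.toFinset.card ≤ nums.length := List.toFinset_card_le nums
    _ = l := hl.symm
  have := Finset.card_le_card hsub
  omega

-- ===== VERDICT (by name: the statement is the Claim_ definition above) =====
theorem findDifferentBinaryString2_spec : Claim_equal_findDifferentBinaryString2 := by
  unfold Claim_equal_findDifferentBinaryString2
  intro nums _
  unfold Spec_findDifferentBinaryString2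
  unfold findDifferentBinaryString2 findDifferentBinaryString2_alt
  set l := nums.length with hl
  set seen := PySem.Set.ofList nums with hs
  set p : String → Bool := fun t => !(PySem.Set.contains seen t) with hp
  rw [pvBacktrack_eq_find?, pvScan_eq_find?, pvCnds_eq_range]
  have hpre : l + 1 ≤ 2^l := Nat.lt_two_pow_self
  have hsplit : (2:Nat)^l = (l + 1) + (2^l - (l + 1)) := by omega
  have hemp : (fun i => "" ++ pvToBin l i) = pvToBin l := by
    funext i; apply String.ext; simp
  rw [hemp, hsplit, List.range_add, List.map_append, List.find?_append]
  cases hfind : ((List.range (l + 1)).map (pvToBin l)).find? p with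
  | none => exact absurd hfind (pv_pigeonhole nums)
  | some t => simp
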